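-- pv_equiv track=rewrite | github.com/jano31415/codejam | kickstart/k2021_h/probb.py | get_strokes_color
-- ===== SOURCE A (Python) =====
-- def get_strokes_color(arr):
--     last = 0
--     count = 0
--     for ai in arr:
--         if (last == 0) and (ai !=0):
--             last =1
--         elif (last == 1) and (ai == 0):
--             last=0
--             count+=1
--     if last == 1:
--         count+=1
--     return count
-- ===== SOURCE B (Python) =====
-- def get_strokes_color(arr):
--     # count run starts: element nonzero whose predecessor (0 before the list) is zero
--     return sum(1 for prev, cur in zip([0] + list(arr), arr) if cur != 0 and prev == 0)
-- ===== Notes on version B (the rewrite author's own statement) =====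
-- stated objective: idiomatic
-- what changed: Replaces the toggle-and-fixup state machine with a one-line count of run starts over zip of the list with its shifted-by-one self.
import Mathlib
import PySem

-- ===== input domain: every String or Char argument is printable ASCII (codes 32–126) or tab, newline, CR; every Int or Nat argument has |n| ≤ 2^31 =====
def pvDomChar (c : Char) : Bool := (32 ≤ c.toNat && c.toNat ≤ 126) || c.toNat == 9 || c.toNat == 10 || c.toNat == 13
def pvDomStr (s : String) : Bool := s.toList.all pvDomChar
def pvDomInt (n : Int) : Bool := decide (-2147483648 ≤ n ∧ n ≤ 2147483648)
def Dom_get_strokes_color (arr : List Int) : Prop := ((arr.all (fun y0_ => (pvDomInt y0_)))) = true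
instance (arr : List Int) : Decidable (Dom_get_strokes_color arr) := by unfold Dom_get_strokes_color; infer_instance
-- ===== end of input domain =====

-- B replaces A's toggle-and-fixup state machine by a one-pass count of run starts
-- (nonzero element whose predecessor, with 0 prepended, is zero); same cost, more idiomatic.

-- ===== PORT A =====
def get_strokes_color (arr : List Int) : Int :=
  let s := arr.foldl (fun (s : Int × Int) ai =>
      if s.1 = 0 ∧ ai ≠ 0 then (1, s.2)
      else if s.1 = 1 ∧ ai = 0 then (0, s.2 + 1)
      else s) (0, 0)
  if s.1 = 1 then s.2 + 1 else s.2

-- ===== PORT B =====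
def get_strokes_color_alt (arr : List Int) : Int :=
  (List.zip (0 :: arr) arr).foldl
    (fun c pc => if pc.2 ≠ 0 ∧ pc.1 = 0 then c + 1 else c) 0

-- ===== PRECONDITION & SPEC =====
def Spec_get_strokes_color (arr : List Int) (out : Int) : Prop := out = get_strokes_color_alt arr
instance (arr : List Int) (out : Int) : Decidable (Spec_get_strokes_color arr out) := by unfold Spec_get_strokes_color; infer_instance

-- ===== CLAIM (what is proved, stated in full; the proofs are below) =====
def Claim_equal_get_strokes_color : Prop := ∀ (arr : List Int), Dom_get_strokes_color arr → Spec_get_strokes_color arr (get_strokes_color arr)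

-- ===== LEMMAS AND PROOFS =====

-- reference count: runs counted at their start, given the previous element p
def pvBCount (p : Int) (l : List Int) : Int :=
  match l with
  | [] => 0
  | a :: t => (if a ≠ 0 ∧ p = 0 then 1 else 0) + pvBCount a t

theorem pvB_eq (l : List Int) : ∀ (p c : Int),
    (List.zip (p :: l) l).foldl
      (fun c pc => if pc.2 ≠ 0 ∧ pc.1 = 0 then c + 1 else c) c
    = c + pvBCount p l := by
  induction l with
  | nil => intro p c; simp [pvBCount]
  | cons a t ih =>
    intro p c
    simp only [List.zip_cons_cons, List.foldl_cons, pvBCount]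
    rw [ih]
    split_ifs <;> ring

theorem pvA_eq (l : List Int) : ∀ (p c : Int),
    (if (l.foldl (fun (s : Int × Int) ai =>
        if s.1 = 0 ∧ ai ≠ 0 then (1, s.2)
        else if s.1 = 1 ∧ ai = 0 then (0, s.2 + 1)
        else s) ((if p = 0 then 0 else 1), c)).1 = 1
      then (l.foldl (fun (s : Int × Int) ai =>
        if s.1 = 0 ∧ ai ≠ 0 then (1, s.2)
        else if s.1 = 1 ∧ ai = 0 then (0, s.2 + 1)
        else s) ((if p = 0 then 0 else 1), c)).2 + 1
      else (l.foldl (fun (s : Int × Int) ai =>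
        if s.1 = 0 ∧ ai ≠ 0 then (1, s.2)
        else if s.1 = 1 ∧ ai = 0 then (0, s.2 + 1)
        else s) ((if p = 0 then 0 else 1), c)).2)
    = c + (if p = 0 then 0 else 1) + pvBCount p l := by
  induction l with
  | nil =>
    intro p c
    by_cases hp : p = 0 <;> simp [hp, pvBCount]
  | cons a t ih =>
    intro p c
    by_cases hp : p = 0 <;> by_cases ha : a = 0 <;>
      · have := ih a c
        have := ih a (c + 1)
        simp_all [pvBCount, List.foldl_cons] <;> omega

-- ===== VERDICT (by name: the statement is the Claim_ definition above) =====
theorem get_strokes_color_spec : Claim_equal_get_strokes_color := by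
  intro arr _
  unfold Spec_get_strokes_color get_strokes_color get_strokes_color_alt
  have hA := pvA_eq arr 0 0
  have hB := pvB_eq arr 0 0
  simp only [hB]
  simpa using hA
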